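-- pv_equiv track=rewrite | github.com/Patxi91/CodeWars_Cloud | 6kyu-Upside down numbers-Patxi.py | check
-- ===== SOURCE A (Python) =====
-- def check(num):
--     combinations = ["00","11","88","69","96"]
--     i = 0
--     j = len(num) - 1
--     while i <= j:
--         n = num[i] + num[j]
--         if not n in combinations:
--             return False
--         i += 1
--         j -= 1
--     return True
-- ===== SOURCE B (Python) =====
-- ROT = {'0': '0', '1': '1', '8': '8', '6': '9', '9': '6'}
--
--
-- def check(num):
--     try:
--         rotated = ''.join(ROT[c] for c in reversed(num))
--     except KeyError:
--         return False
--     return rotated == num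
-- ===== Notes on version B (the rewrite author's own statement) =====
-- stated objective: simpler
-- what changed: Replaces A's two-pointer loop testing each end-pair against a list of valid pairs with a one-pass reconstruction: map each character of reversed(num) through a digit-rotation dict (KeyError -> False) and compare the rotated string with num for equality.
import Mathlib
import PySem

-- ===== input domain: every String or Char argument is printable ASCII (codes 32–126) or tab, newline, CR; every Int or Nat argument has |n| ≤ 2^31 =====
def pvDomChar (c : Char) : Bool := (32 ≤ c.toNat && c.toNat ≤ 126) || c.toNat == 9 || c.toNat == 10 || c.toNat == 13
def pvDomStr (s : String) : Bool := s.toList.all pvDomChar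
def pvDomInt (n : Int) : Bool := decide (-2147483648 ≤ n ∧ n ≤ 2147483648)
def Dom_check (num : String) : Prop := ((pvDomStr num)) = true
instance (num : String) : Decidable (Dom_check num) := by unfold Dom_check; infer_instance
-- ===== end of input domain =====

-- B replaces A's two-pointer pair-membership loop by one reconstruction of the 180°-rotated
-- string (digit-rotation map over reversed(num)) compared for equality; objective: simpler.

-- ===== PORT A =====
def pvCombos : List String := ["00", "11", "88", "69", "96"]

def checkLoop (cs : List Char) (i j : Int) : Bool :=
  if h : i ≤ j then
    match PySem.List.pyGet? cs i, PySem.List.pyGet? cs j with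
    | some a, some b =>
        if String.ofList [a, b] ∈ pvCombos then checkLoop cs (i + 1) (j - 1) else false
    | _, _ => false   -- unreachable for the in-range indices check uses
  else true
termination_by (j + 1 - i).toNat
decreasing_by omega

def check (num : String) : Bool :=
  checkLoop num.toList 0 ((num.toList.length : Int) - 1)

-- ===== PORT B =====
def pvRot : PySem.Dict Char Char :=
  PySem.Dict.ofList [('0', '0'), ('1', '1'), ('8', '8'), ('6', '9'), ('9', '6')]

def check_alt (num : String) : Bool :=
  match num.toList.reverse.mapM (fun c => PySem.Dict.get? pvRot c) with
  | none => false           -- KeyError: some character has no rotation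
  | some r => String.ofList r == num

-- ===== PRECONDITION & SPEC =====
def Spec_check (num : String) (out : Bool) : Prop := out = check_alt num
instance (num : String) (out : Bool) : Decidable (Spec_check num out) := by unfold Spec_check; infer_instance

-- ===== CLAIM (what is proved, stated in full; the proofs are below) =====
def Claim_equal_check : Prop := ∀ (num : String), Dom_check num → Spec_check num (check num)

-- ===== LEMMAS AND PROOFS =====

lemma rot_get (b : Char) : PySem.Dict.get? pvRot b =
    if '0' == b then some '0' else if '1' == b then some '1' else if '8' == b then some '8'
    else if '6' == b then some '9' else if '9' == b then some '6' else none := by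
  rw [show pvRot = PySem.Dict.mk [('0','0'),('1','1'),('8','8'),('6','9'),('9','6')] from rfl]
  simp only [PySem.Dict.get?_mk_cons]
  split_ifs <;> rfl

lemma rot_cases {a b : Char} (h : PySem.Dict.get? pvRot b = some a) :
    (b = '0' ∧ a = '0') ∨ (b = '1' ∧ a = '1') ∨ (b = '8' ∧ a = '8') ∨
    (b = '6' ∧ a = '9') ∨ (b = '9' ∧ a = '6') := by
  rw [rot_get] at h
  split_ifs at h with h1 h2 h3 h4 h5
  · exact Or.inl ⟨(beq_iff_eq.mp h1).symm, (Option.some.inj h).symm⟩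
  · exact Or.inr (Or.inl ⟨(beq_iff_eq.mp h2).symm, (Option.some.inj h).symm⟩)
  · exact Or.inr (Or.inr (Or.inl ⟨(beq_iff_eq.mp h3).symm, (Option.some.inj h).symm⟩))
  · exact Or.inr (Or.inr (Or.inr (Or.inl ⟨(beq_iff_eq.mp h4).symm, (Option.some.inj h).symm⟩)))
  · exact Or.inr (Or.inr (Or.inr (Or.inr ⟨(beq_iff_eq.mp h5).symm, (Option.some.inj h).symm⟩)))

lemma rot_symm {a b : Char} (h : PySem.Dict.get? pvRot b = some a) :
    PySem.Dict.get? pvRot a = some b := by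
  rcases rot_cases h with ⟨rfl, rfl⟩ | ⟨rfl, rfl⟩ | ⟨rfl, rfl⟩ | ⟨rfl, rfl⟩ | ⟨rfl, rfl⟩ <;> decide

lemma pairRot (a b : Char) :
    (String.ofList [a, b] ∈ pvCombos) ↔ PySem.Dict.get? pvRot b = some a := by
  constructor
  · intro h
    have h' : String.ofList [a, b] = String.ofList ['0','0'] ∨
        String.ofList [a, b] = String.ofList ['1','1'] ∨
        String.ofList [a, b] = String.ofList ['8','8'] ∨
        String.ofList [a, b] = String.ofList ['6','9'] ∨
        String.ofList [a, b] = String.ofList ['9','6'] := by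
      simpa [pvCombos] using h
    rcases h' with h' | h' | h' | h' | h' <;>
      · rw [String.ofList_inj] at h'
        simp only [List.cons.injEq, and_true] at h'
        obtain ⟨rfl, rfl, -⟩ := h'
        decide
  · intro h
    rcases rot_cases h with ⟨rfl, rfl⟩ | ⟨rfl, rfl⟩ | ⟨rfl, rfl⟩ | ⟨rfl, rfl⟩ | ⟨rfl, rfl⟩ <;> decide

-- A's loop, characterised: it accepts iff every position k in [i, j] is the rotation of its mirror.
lemma checkLoop_true_iff (cs : List Char) :
    ∀ (m : Nat) (i j : Int), (j + 1 - i).toNat ≤ m → 0 ≤ i → j < (cs.length : Int) →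
    (checkLoop cs i j = true ↔
      ∀ k : Nat, i ≤ (k : Int) → (k : Int) ≤ j →
        PySem.Dict.get? pvRot (cs.getD ((i + j - (k : Int)).toNat) 'x') = some (cs.getD k 'x')) := by
  intro m
  induction m with
  | zero =>
    intro i j hm hi hj
    rw [checkLoop, dif_neg (show ¬ i ≤ j by omega)]
    constructor
    · intro _ k hk1 hk2; exact absurd hk2 (by omega)
    · intro _; rfl
  | succ m ih =>
    intro i j hm hi hj
    by_cases hij : i ≤ j
    · have hjn : j.toNat < cs.length := by omega
      have hin : i.toNat < cs.length := by omega
      have hgi : PySem.List.pyGet? cs i = some cs[i.toNat] :=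
        PySem.List.pyGet?_eq_some_getElem cs hi (by omega)
      have hgj : PySem.List.pyGet? cs j = some cs[j.toNat] :=
        PySem.List.pyGet?_eq_some_getElem cs (by omega) (by omega)
      rw [checkLoop, dif_pos hij, hgi, hgj]
      rw [show (match some cs[i.toNat], some cs[j.toNat] with
            | some a, some b =>
                if String.ofList [a, b] ∈ pvCombos then checkLoop cs (i + 1) (j - 1) else false
            | _, _ => false) =
          (if String.ofList [cs[i.toNat], cs[j.toNat]] ∈ pvCombos then
            checkLoop cs (i + 1) (j - 1) else false) from rfl]
      by_cases hpair : String.ofList [cs[i.toNat], cs[j.toNat]] ∈ pvCombos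
      · rw [if_pos hpair, ih (i + 1) (j - 1) (by omega) (by omega) (by omega)]
        have hrot : PySem.Dict.get? pvRot (cs.getD j.toNat 'x') = some (cs.getD i.toNat 'x') := by
          rw [List.getD_eq_getElem _ _ hjn, List.getD_eq_getElem _ _ hin]
          exact (pairRot _ _).mp hpair
        constructor
        · intro hP' k hk1 hk2
          by_cases hki : (k : Int) = i
          · rw [show (i + j - (k : Int)).toNat = j.toNat by omega,
                show k = i.toNat by omega]
            exact hrot
          · by_cases hkj : (k : Int) = j
            · rw [show (i + j - (k : Int)).toNat = i.toNat by omega,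
                  show k = j.toNat by omega]
              exact rot_symm hrot
            · have h2 := hP' k (by omega) (by omega)
              rw [show (i + 1 + (j - 1) - (k : Int)) = i + j - k from by ring] at h2
              exact h2
        · intro hP k hk1 hk2
          have h2 := hP k (by omega) (by omega)
          rw [show (i + 1 + (j - 1) - (k : Int)) = i + j - k from by ring]
          exact h2
      · rw [if_neg hpair]
        constructor
        · intro h; exact absurd h (by simp)
        · intro hP
          exfalso
          have h2 := hP i.toNat (by omega) (by omega)
          rw [show (i + j - (i.toNat : Int)).toNat = j.toNat by omega] at h2
          exact hpair ((pairRot _ _).mpr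
            (by rwa [List.getD_eq_getElem _ _ hjn, List.getD_eq_getElem _ _ hin] at h2))
    · rw [checkLoop, dif_neg hij]
      constructor
      · intro _ k hk1 hk2; exact absurd hk2 (by omega)
      · intro _; rfl

lemma mapM_some {f : Char → Option Char} :
    ∀ (l r : List Char), l.mapM f = some r →
      r.length = l.length ∧ ∀ k, k < l.length → f (l.getD k 'x') = some (r.getD k 'x') := by
  intro l
  induction l with
  | nil =>
    intro r h
    simp only [List.mapM_nil, Option.pure_def, Option.some.injEq] at h
    subst h
    exact ⟨rfl, fun k hk => absurd hk (by simp)⟩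
  | cons a l ih =>
    intro r h
    rw [List.mapM_cons] at h
    cases hfa : f a with
    | none => rw [hfa] at h; simp at h
    | some b =>
    cases hbs : l.mapM f with
    | none => rw [hfa, hbs] at h; simp at h
    | some bs =>
    rw [hfa, hbs] at h
    have hr : some (b :: bs) = some r := by simpa using h
    obtain rfl := Option.some.inj hr
    obtain ⟨hlen, hall⟩ := ih bs hbs
    refine ⟨by simp [hlen], fun k hk => ?_⟩
    cases k with
    | zero => simpa using hfa
    | succ k => simpa using hall k (by simpa using hk)

lemma mapM_none {f : Char → Option Char} :
    ∀ (l : List Char), l.mapM f = none →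
      ∃ k, k < l.length ∧ f (l.getD k 'x') = none := by
  intro l
  induction l with
  | nil => intro h; simp [List.mapM_nil] at h
  | cons a l ih =>
    intro h
    rw [List.mapM_cons] at h
    cases hfa : f a with
    | none => exact ⟨0, by simp, by simpa using hfa⟩
    | some b =>
      cases hbs : l.mapM f with
      | none =>
        obtain ⟨k, hk, hfk⟩ := ih hbs
        exact ⟨k + 1, by simp only [List.length_cons]; omega, by simpa using hfk⟩
      | some bs => rw [hfa, hbs] at h; simp at h

lemma getD_reverse (cs : List Char) (k : Nat) (hk : k < cs.length) :
    cs.reverse.getD k 'x' = cs.getD (cs.length - 1 - k) 'x' := by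
  rw [List.getD_eq_getElem _ _ (by simpa using hk), List.getD_eq_getElem _ _ (by omega)]
  simp [List.getElem_reverse]

lemma check_alt_true_iff (num : String) :
    check_alt num = true ↔
      ∀ k : Nat, k < num.toList.length →
        PySem.Dict.get? pvRot (num.toList.getD (num.toList.length - 1 - k) 'x') =
          some (num.toList.getD k 'x') := by
  unfold check_alt
  cases hm : num.toList.reverse.mapM (fun c => PySem.Dict.get? pvRot c) with
  | none =>
    constructor
    · intro h; exact absurd h (by simp)
    · intro hP
      exfalso
      obtain ⟨k, hk, hfk⟩ := mapM_none _ hm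
      rw [List.length_reverse] at hk
      rw [getD_reverse _ _ hk] at hfk
      rw [hP k hk] at hfk
      exact Option.some_ne_none _ hfk
  | some r =>
    obtain ⟨hlen, hall⟩ := mapM_some _ r hm
    rw [List.length_reverse] at hlen
    constructor
    · intro hEq k hk
      have hr : String.ofList r = num := beq_iff_eq.mp hEq
      have hr' : r = num.toList := by
        have := congrArg String.toList hr
        simpa using this
      subst hr'
      have := hall k (by simpa using hk)
      rwa [getD_reverse _ _ hk] at this
    · intro hP
      have hr' : r = num.toList := by
        apply List.ext_getElem (by simpa using hlen)
        intro k hk1 hk2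
        have hk : k < num.toList.length := hk2
        have h1 := hall k (by simpa using hk)
        rw [getD_reverse _ _ hk, hP k hk] at h1
        have h2 := Option.some.inj h1
        rw [List.getD_eq_getElem _ _ hk2, List.getD_eq_getElem _ _ hk1] at h2
        exact h2.symm
      rw [hr']
      simp

-- ===== VERDICT (by name: the statement is the Claim_ definition above) =====
theorem check_spec : Claim_equal_check := by
  intro num _
  unfold Spec_check
  rw [Bool.eq_iff_iff]
  have hA := checkLoop_true_iff num.toList
    (((num.toList.length : Int) - 1) + 1 - 0).toNat 0 ((num.toList.length : Int) - 1)
    (le_refl _) (by omega) (by omega)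
  rw [show check num = checkLoop num.toList 0 ((num.toList.length : Int) - 1) from rfl,
    hA, check_alt_true_iff num]
  constructor
  · intro h k hk
    have h2 := h k (by omega) (by omega)
    rwa [show (0 + ((num.toList.length : Int) - 1) - (k : Int)).toNat =
        num.toList.length - 1 - k by omega] at h2
  · intro h k hk1 hk2
    have hk : k < num.toList.length := by omega
    have h2 := h k hk
    rwa [show (0 + ((num.toList.length : Int) - 1) - (k : Int)).toNat =
        num.toList.length - 1 - k by omega]
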